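-- pv_equiv track=rewrite | github.com/Antares0982/telegram-dice-bot | dicefunc.py | realdiv
-- ===== SOURCE A (Python) =====
-- def realdiv(a: int, b: int) -> int:
--     """解决python负数与正数的整除结果是实际除法结果向下取整的问题"""
--     if b == 0:
--         raise ValueError
--     if b < 0:
--         return realdiv(-a, -b)
--     if a < 0:
--         return -((-a)//b)
--     return a//b
-- ===== SOURCE B (Python) =====
-- def realdiv(a: int, b: int) -> int:
--     if b == 0:
--         raise ValueError
--     q = a // b
--     if q < 0 and q * b != a:
--         q += 1
--     return q
-- ===== Notes on version B (the rewrite author's own statement) =====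
-- stated objective: simpler
-- what changed: Replaced A's recursive sign-normalization (negate both operands, then negate the quotient of the negated dividend) with one non-recursive floor division plus a single toward-zero correction when the floor quotient is negative with nonzero remainder.
import Mathlib
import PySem

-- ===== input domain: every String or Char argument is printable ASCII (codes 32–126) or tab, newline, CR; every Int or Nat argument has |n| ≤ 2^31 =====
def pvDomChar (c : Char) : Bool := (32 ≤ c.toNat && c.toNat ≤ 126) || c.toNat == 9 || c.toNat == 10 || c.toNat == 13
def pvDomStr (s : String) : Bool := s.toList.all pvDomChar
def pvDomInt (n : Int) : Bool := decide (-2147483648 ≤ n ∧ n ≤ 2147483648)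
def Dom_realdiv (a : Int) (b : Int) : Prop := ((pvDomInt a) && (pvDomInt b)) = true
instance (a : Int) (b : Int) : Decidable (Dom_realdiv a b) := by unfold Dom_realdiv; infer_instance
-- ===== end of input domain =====

-- B replaces A's recursive sign-normalization by one floor division with a toward-zero
-- correction (simpler: no recursion, single pass).


-- ===== PORT A =====
-- b = 0 raises ValueError in Python; that input is excluded by Pre_realdiv (value 0 here is
-- never claimed about). The b < 0 branch recurses exactly once, as in A.
def realdiv (a : Int) (b : Int) : Int :=
  if b = 0 then 0
  else if _h : b < 0 then realdiv (-a) (-b)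
  else if a < 0 then -(PySem.Int.floordiv (-a) b)
  else PySem.Int.floordiv a b
termination_by (if b < 0 then 1 else 0 : Nat)
decreasing_by simp_all; omega

-- ===== PORT B =====
def realdiv_alt (a : Int) (b : Int) : Int :=
  -- B raises ValueError for b = 0 (excluded by Pre_realdiv)
  let q := PySem.Int.floordiv a b
  if q < 0 ∧ q * b ≠ a then q + 1 else q

-- ===== PRECONDITION & SPEC =====
-- Pre_ excludes exactly b = 0, where both Pythons raise ValueError.
def Pre_realdiv (a : Int) (b : Int) : Prop := b ≠ 0
instance (a : Int) (b : Int) : Decidable (Pre_realdiv a b) := by unfold Pre_realdiv; infer_instance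
def pvWitness_realdiv : Int × Int := (-7, 2)

def Spec_realdiv (a : Int) (b : Int) (out : Int) : Prop := out = realdiv_alt a b
instance (a : Int) (b : Int) (out : Int) : Decidable (Spec_realdiv a b out) := by unfold Spec_realdiv; infer_instance

-- ===== CLAIM (what is proved, stated in full; the proofs are below) =====
def Claim_equal_realdiv : Prop := ∀ (a : Int) (b : Int), Dom_realdiv a b → Pre_realdiv a b → Spec_realdiv a b (realdiv a b)

-- ===== LEMMAS AND PROOFS =====

-- Both sides computed as floor division (fdiv semantics): A for positive b, plus the neg-neg
-- reduction; then a case analysis on signs equates B's corrected value with A's branches.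
theorem realdiv_alt_eq (a b : Int) (hb : 0 < b) :
    realdiv_alt a b = if a < 0 then -(PySem.Int.floordiv (-a) b) else PySem.Int.floordiv a b := by
  unfold realdiv_alt
  show (if PySem.Int.floordiv a b < 0 ∧ PySem.Int.floordiv a b * b ≠ a then
      PySem.Int.floordiv a b + 1 else PySem.Int.floordiv a b) = _
  rw [PySem.Int.floordiv_eq_ediv_of_pos hb, PySem.Int.floordiv_eq_ediv_of_pos hb]
  set q := a / b with hq
  set q' := (-a) / b with hq'
  set r := a % b with hr
  set r' := (-a) % b with hr'
  have ha : b * q + r = a := Int.mul_ediv_add_emod a b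
  have ha' : b * q' + r' = -a := Int.mul_ediv_add_emod (-a) b
  have hr0 : 0 ≤ r := Int.emod_nonneg a (by omega)
  have hrb : r < b := Int.emod_lt_of_pos a hb
  have hr0' : 0 ≤ r' := Int.emod_nonneg (-a) (by omega)
  have hrb' : r' < b := Int.emod_lt_of_pos (-a) hb
  have hsum : b * (q + q') = -(r + r') := by ring_nf; linarith
  have hqq : q + q' = 0 ∨ q + q' = -1 := by
    have h1 : q + q' ≤ 0 := by nlinarith
    have h2 : -2 < q + q' := by nlinarith
    omega
  by_cases hneg : a < 0
  · rw [if_pos hneg]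
    by_cases hrz : r = 0
    · have hqb : q * b = a := by linarith [mul_comm q b]
      rw [if_neg (by intro h; exact h.2 hqb)]
      rcases hqq with h | h
      · linarith
      · exfalso
        have : b * (q + q') = -b := by rw [h]; ring
        linarith
    · have hqlt : q < 0 := by nlinarith
      have hqb : q * b ≠ a := by
        intro h; apply hrz; linarith [mul_comm q b]
      rw [if_pos ⟨hqlt, hqb⟩]
      rcases hqq with h | h
      · exfalso
        have : b * (q + q') = 0 := by rw [h]; ring
        have hrz' : r + r' = 0 := by linarith
        omega
      · linarith
  · rw [if_neg hneg]
    have : 0 ≤ q := Int.ediv_nonneg (by omega) (by omega)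
    rw [if_neg (by intro h; omega)]

theorem realdiv_spec : Claim_equal_realdiv := by
  intro a b _ hb
  unfold Spec_realdiv
  unfold realdiv
  unfold Pre_realdiv at hb
  by_cases hbn : b < 0
  · simp only [if_neg hb, dif_pos hbn]
    unfold realdiv
    have h1 : ¬ (-b = 0) := by omega
    have h2 : ¬ (-b < 0) := by omega
    rw [if_neg h1, dif_neg h2, ← realdiv_alt_eq (-a) (-b) (by omega)]
    unfold realdiv_alt
    simp only [PySem.Int.floordiv_neg_neg, mul_neg, ne_eq, neg_inj]
  · simp only [if_neg hb, dif_neg hbn]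
    rw [realdiv_alt_eq a b (by omega)]
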